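-- pv_equiv track=rewrite | github.com/Fondamenti18/fondamenti-di-programmazione | students/1815399/homework04/program01.py | livelli
-- ===== SOURCE A (Python) =====
-- def livelli(d,x,diz,livello=0):
--     if str(livello) not in diz:
--         diz[str(livello)]= []
--
--     diz[str(livello)].append(x)
--
--     i=0
--     while i < len(d[x]):
--
--              livelli(d,d[x][i],diz,livello+1)
--              i+=1
--     return diz
-- ===== SOURCE B (Python) =====
-- def livelli(d, x, diz, livello=0):
--     stack = [(x, livello)]
--     while stack:
--         node, lev = stack.pop()
--         diz.setdefault(str(lev), []).append(node)
--         stack.extend((c, lev + 1) for c in reversed(d[node]))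
--     return diz
-- ===== Notes on version B (the rewrite author's own statement) =====
-- stated objective: alternative
-- what changed: The recursive DFS is replaced by an iterative loop over an explicit stack of (node, level) pairs (children pushed in reverse), and the two-step level-list creation is replaced by a single setdefault call.
import Mathlib
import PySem

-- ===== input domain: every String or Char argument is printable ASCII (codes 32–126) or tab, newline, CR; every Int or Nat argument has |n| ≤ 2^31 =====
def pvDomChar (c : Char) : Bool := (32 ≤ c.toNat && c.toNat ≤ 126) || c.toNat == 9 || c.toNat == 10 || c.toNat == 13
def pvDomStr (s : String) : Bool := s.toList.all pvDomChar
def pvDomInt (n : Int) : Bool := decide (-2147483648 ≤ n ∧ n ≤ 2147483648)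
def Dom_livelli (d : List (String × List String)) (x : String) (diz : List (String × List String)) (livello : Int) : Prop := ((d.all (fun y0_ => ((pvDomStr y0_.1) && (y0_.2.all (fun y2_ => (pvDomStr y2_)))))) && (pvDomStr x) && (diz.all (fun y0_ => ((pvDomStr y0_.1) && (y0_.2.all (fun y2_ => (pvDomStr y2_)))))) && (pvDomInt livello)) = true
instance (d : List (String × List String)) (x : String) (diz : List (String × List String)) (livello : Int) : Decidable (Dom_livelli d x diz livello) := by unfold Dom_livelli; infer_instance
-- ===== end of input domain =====

-- B replaces A's recursion by an explicit stack of (node, level) pairs and uses setdefault for the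
-- level lists; same visit order and same return value (both Pythons mutate `diz` identically in place).

-- ===== PORT A =====
-- recursive DFS; fuel = d.length + 1 bounds the recursion depth (on Pre_ inputs every
-- path from x consists of distinct keys of d, so the depth never reaches the fuel)
def livelliGo (d : PySem.Dict String (List String)) : Nat → String → PySem.Dict String (List String) → Int → PySem.Dict String (List String)
  | 0, _, diz, _ => diz
  | fuel + 1, x, diz, livello =>
    let key := PySem.Int.toStr livello
    let diz1 := if PySem.Dict.contains diz key then diz else PySem.Dict.insert diz key []
    let diz2 := PySem.Dict.modify diz1 key [] (fun l => l ++ [x])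
    -- 'i=0; while i < len(d[x]): livelli(d, d[x][i], diz, livello+1); i+=1' as a fold over d[x]
    ((PySem.Dict.get? d x).getD []).foldl (fun dz c => livelliGo d fuel c dz (livello + 1)) diz2

def livelli (d : List (String × List String)) (x : String) (diz : List (String × List String)) (livello : Int) : List (String × List String) :=
  (livelliGo (PySem.Dict.mk d) (d.length + 1) x (PySem.Dict.mk diz) livello).items

-- ===== PORT B =====
-- stack entries, head = top of the Python stack (stack.pop() pops the end); pushing the children
-- reversed and popping from the end is prepending the children in order
def livelliAltGo (d : PySem.Dict String (List String)) : Nat → List (String × Int) → PySem.Dict String (List String) → PySem.Dict String (List String)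
  | _, [], diz => diz
  | 0, _ :: _, diz => diz
  | fuel + 1, (node, lev) :: stack, diz =>
    let key := PySem.Int.toStr lev
    let diz' := PySem.Dict.modify (PySem.Dict.setdefault diz key []) key [] (fun l => l ++ [node])
    livelliAltGo d fuel ((((PySem.Dict.get? d node).getD []).map (fun c => (c, lev + 1))) ++ stack) diz'

-- fuel bounding the number of loop iterations (= visited nodes) on Pre_ inputs
def pvBigFuel (d : List (String × List String)) : Nat :=
  (d.foldl (fun a p => a + p.2.length) 0 + 2) ^ (d.length + 2)

def livelli_alt (d : List (String × List String)) (x : String) (diz : List (String × List String)) (livello : Int) : List (String × List String) :=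
  (livelliAltGo (PySem.Dict.mk d) (pvBigFuel d) [(x, livello)] (PySem.Dict.mk diz)).items

-- ===== PRECONDITION & SPEC =====
def pvChildren (d : PySem.Dict String (List String)) (y : String) : List String :=
  (PySem.Dict.get? d y).getD []

-- one closure step of reachability: add every child of every member
def pvGrow (d : PySem.Dict String (List String)) (s : List String) : List String :=
  s.foldl (fun acc y => (pvChildren d y).foldl (fun a c => PySem.Set.add a c) acc) s

def pvFuelR (d : PySem.Dict String (List String)) : Nat :=
  (d.items.foldl (fun a p => a + p.2.length) 0) + 1

-- the set of nodes reachable from x (iterated to its fixpoint)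
def pvReachSet (d : PySem.Dict String (List String)) (x : String) : List String :=
  (pvGrow d)^[pvFuelR d] [x]

-- Pre_ = exactly the inputs where the Python A returns: every node reachable from x is a key of d
-- (else KeyError) and no reachable node lies on a cycle (else infinite recursion)
def Pre_livelli (d : List (String × List String)) (x : String) (diz : List (String × List String)) (livello : Int) : Prop :=
  ∀ y ∈ pvReachSet (PySem.Dict.mk d) x,
    PySem.Dict.contains (PySem.Dict.mk d) y = true ∧
    ∀ c ∈ pvChildren (PySem.Dict.mk d) y, y ∉ pvReachSet (PySem.Dict.mk d) c
instance (d : List (String × List String)) (x : String) (diz : List (String × List String)) (livello : Int) : Decidable (Pre_livelli d x diz livello) := by unfold Pre_livelli; infer_instance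

def pvWitness_livelli : (List (String × List String)) × String × (List (String × List String)) × Int :=
  ([("a", ["b", "b"]), ("b", [])], "a", [], 0)

def Spec_livelli (d : List (String × List String)) (x : String) (diz : List (String × List String)) (livello : Int) (out : List (String × List String)) : Prop := out = livelli_alt d x diz livello
instance (d : List (String × List String)) (x : String) (diz : List (String × List String)) (livello : Int) (out : List (String × List String)) : Decidable (Spec_livelli d x diz livello out) := by unfold Spec_livelli; infer_instance

-- ===== CLAIM (what is proved, stated in full; the proofs are below) =====
def Claim_equal_livelli : Prop := ∀ (d : List (String × List String)) (x : String) (diz : List (String × List String)) (livello : Int), Dom_livelli d x diz livello → Pre_livelli d x diz livello → Spec_livelli d x diz livello (livelli d x diz livello)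

-- ===== LEMMAS AND PROOFS =====

theorem pvWitness_ok : Dom_livelli pvWitness_livelli.1 pvWitness_livelli.2.1 pvWitness_livelli.2.2.1 pvWitness_livelli.2.2.2 ∧ Pre_livelli pvWitness_livelli.1 pvWitness_livelli.2.1 pvWitness_livelli.2.2.1 pvWitness_livelli.2.2.2 := by
  constructor <;> decide

-- reachability as a relation (proof-side only)
inductive pvReach (d : PySem.Dict String (List String)) : String → String → Prop
  | refl (x : String) : pvReach d x x
  | tail {x y c : String} : pvReach d x y → c ∈ pvChildren d y → pvReach d x c

theorem pv_mem_foldl_add (l : List String) (acc : List String) (z : String) :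
    z ∈ l.foldl (fun a c => PySem.Set.add a c) acc ↔ z ∈ acc ∨ z ∈ l := by
  induction l generalizing acc with
  | nil => simp
  | cons c t ih => simp [ih, PySem.Set.mem_add]; tauto

theorem pv_foldl_add_prefix (l : List String) (acc : List String) :
    ∃ t, l.foldl (fun a c => PySem.Set.add a c) acc = acc ++ t := by
  induction l generalizing acc with
  | nil => exact ⟨[], by simp⟩
  | cons c t ih =>
    rcases ih (PySem.Set.add acc c) with ⟨u, hu⟩
    rw [PySem.Set.add_eq_ite] at hu
    by_cases h : c ∈ acc
    · simp [h] at hu; exact ⟨u, by simpa [h] using hu⟩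
    · simp [h] at hu; exact ⟨[c] ++ u, by simpa [h] using hu⟩

theorem pv_foldl_add_nodup (l : List String) (acc : List String) (h : acc.Nodup) :
    (l.foldl (fun a c => PySem.Set.add a c) acc).Nodup := by
  induction l generalizing acc with
  | nil => exact h
  | cons c t ih => exact ih _ (PySem.Set.nodup_add _ _ h)

theorem pvGrow_mem (d : PySem.Dict String (List String)) (s : List String) (z : String) :
    z ∈ pvGrow d s ↔ z ∈ s ∨ ∃ y ∈ s, z ∈ pvChildren d y := by
  unfold pvGrow
  suffices h : ∀ acc, z ∈ s.foldl (fun acc y => (pvChildren d y).foldl (fun a c => PySem.Set.add a c) acc) acc ↔ z ∈ acc ∨ ∃ y ∈ s, z ∈ pvChildren d y by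
    exact h s
  induction s with
  | nil => simp
  | cons y t ih =>
    intro acc
    simp only [List.foldl_cons, ih, pv_mem_foldl_add]
    constructor
    · rintro (( h | h) | ⟨w, hw, hz⟩)
      · exact Or.inl h
      · exact Or.inr ⟨y, by simp, h⟩
      · exact Or.inr ⟨w, by simp [hw], hz⟩
    · rintro (h | ⟨w, hw, hz⟩)
      · exact Or.inl (Or.inl h)
      · rcases List.mem_cons.mp hw with rfl | hw
        · exact Or.inl (Or.inr hz)
        · exact Or.inr ⟨w, hw, hz⟩

theorem pvGrow_prefix (d : PySem.Dict String (List String)) (s : List String) :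
    ∃ t, pvGrow d s = s ++ t := by
  unfold pvGrow
  suffices h : ∀ acc, ∃ t, s.foldl (fun acc y => (pvChildren d y).foldl (fun a c => PySem.Set.add a c) acc) acc = acc ++ t from h s
  induction s with
  | nil => exact fun acc => ⟨[], by simp⟩
  | cons y t ih =>
    intro acc
    rcases pv_foldl_add_prefix (pvChildren d y) acc with ⟨u, hu⟩
    rcases ih ((pvChildren d y).foldl (fun a c => PySem.Set.add a c) acc) with ⟨v, hv⟩
    rw [hu] at hv
    exact ⟨u ++ v, by simp [List.foldl_cons, hu, hv]⟩

theorem pv_outer_nodup (d : PySem.Dict String (List String)) (l : List String) :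
    ∀ acc, acc.Nodup → (l.foldl (fun acc y => (pvChildren d y).foldl (fun a c => PySem.Set.add a c) acc) acc).Nodup := by
  induction l with
  | nil => exact fun acc ha => ha
  | cons y t ih =>
    intro acc ha
    exact ih ((pvChildren d y).foldl (fun a c => PySem.Set.add a c) acc) (pv_foldl_add_nodup _ _ ha)

theorem pvGrow_nodup (d : PySem.Dict String (List String)) (s : List String) (h : s.Nodup) :
    (pvGrow d s).Nodup := pv_outer_nodup d s s h

-- every child list is contained in the flattened values of d
theorem pvChildren_subset (d : PySem.Dict String (List String)) (y c : String) (h : c ∈ pvChildren d y) :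
    c ∈ d.items.flatMap (·.2) := by
  unfold pvChildren at h
  cases hg : PySem.Dict.get? d y with
  | none => rw [hg] at h; simp at h
  | some l =>
    rw [hg] at h; simp at h
    exact List.mem_flatMap.mpr ⟨(y, l), (PySem.Dict.mem_items_of_get?_eq_some _ hg), h⟩

def pvUniv (d : PySem.Dict String (List String)) (x : String) : List String :=
  x :: d.items.flatMap (·.2)

theorem pv_iter_subset_univ (d : PySem.Dict String (List String)) (x : String) (i : Nat) :
    (pvGrow d)^[i] [x] ⊆ pvUniv d x := by
  induction i with
  | zero => intro z hz; simp at hz; simp [pvUniv, hz]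
  | succ n ih =>
    rw [Function.iterate_succ_apply']
    intro z hz
    rcases (pvGrow_mem d _ z).mp hz with h | ⟨y, hy, hz⟩
    · exact ih h
    · exact List.mem_cons_of_mem _ (pvChildren_subset d y z hz)

theorem pv_iter_nodup (d : PySem.Dict String (List String)) (x : String) (i : Nat) :
    ((pvGrow d)^[i] [x]).Nodup := by
  induction i with
  | zero => simp
  | succ n ih => rw [Function.iterate_succ_apply']; exact pvGrow_nodup d _ ih

theorem pv_nodup_subset_length {s u : List String} (hn : s.Nodup) (hsub : s ⊆ u) :
    s.length ≤ u.length := by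
  calc s.length = s.toFinset.card := (List.toFinset_card_of_nodup hn).symm
    _ ≤ u.toFinset.card := Finset.card_le_card (fun a ha => by
        simp only [List.mem_toFinset] at *; exact hsub ha)
    _ ≤ u.length := u.toFinset_card_le

theorem pv_foldl_sum (l : List (String × List String)) :
    ∀ a : Nat, l.foldl (fun a p => a + p.2.length) a = a + (l.map (fun p => p.2.length)).sum := by
  induction l with
  | nil => simp
  | cons p t ih => intro a; simp [ih, Nat.add_assoc]

theorem pv_univ_length (d : PySem.Dict String (List String)) (x : String) :
    (pvUniv d x).length = pvFuelR d := by
  unfold pvUniv pvFuelR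
  simp only [List.length_cons, List.length_flatMap]
  congr 1
  simpa using (pv_foldl_sum d.items 0).symm

theorem pv_growth (d : PySem.Dict String (List String)) (x : String) :
    ∀ n, (∀ i < n, pvGrow d ((pvGrow d)^[i] [x]) ≠ (pvGrow d)^[i] [x]) →
      n + 1 ≤ ((pvGrow d)^[n] [x]).length := by
  intro n
  induction n with
  | zero => simp
  | succ m ih =>
    intro h
    have h1 := ih (fun i hi => h i (by omega))
    have h2 := h m (by omega)
    rcases pvGrow_prefix d ((pvGrow d)^[m] [x]) with ⟨t, ht⟩
    have htne : t ≠ [] := by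
      intro h0; rw [h0, List.append_nil] at ht; exact h2 ht
    rw [Function.iterate_succ_apply', ht]
    have := List.length_pos_of_ne_nil htne
    simp only [List.length_append]
    omega

-- the iteration reaches its fixpoint: pvReachSet is closed under pvGrow
theorem pvReachSet_fixed (d : PySem.Dict String (List String)) (x : String) :
    pvGrow d (pvReachSet d x) = pvReachSet d x := by
  by_cases h : ∃ i < pvFuelR d, pvGrow d ((pvGrow d)^[i] [x]) = (pvGrow d)^[i] [x]
  · rcases h with ⟨i, hi, hfix⟩
    have hN : pvReachSet d x = (pvGrow d)^[i] [x] := by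
      unfold pvReachSet
      have he : pvFuelR d = (pvFuelR d - i) + i := by omega
      rw [he, Function.iterate_add_apply, Function.iterate_fixed hfix]
    rw [hN, hfix]
  · push_neg at h
    have hlen := pv_growth d x (pvFuelR d) h
    have hle := pv_nodup_subset_length (pv_iter_nodup d x (pvFuelR d)) (pv_iter_subset_univ d x (pvFuelR d))
    rw [pv_univ_length] at hle
    omega

theorem pv_mem_iter_self (d : PySem.Dict String (List String)) (x : String) :
    ∀ i, x ∈ (pvGrow d)^[i] [x] := by
  intro i
  induction i with
  | zero => simp
  | succ m ih =>
    rw [Function.iterate_succ_apply']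
    rcases pvGrow_prefix d ((pvGrow d)^[m] [x]) with ⟨t, ht⟩
    rw [ht]
    exact List.mem_append_left t ih

theorem pv_mem_self (d : PySem.Dict String (List String)) (x : String) : x ∈ pvReachSet d x :=
  pv_mem_iter_self d x (pvFuelR d)

theorem pvReachSet_sound (d : PySem.Dict String (List String)) (x z : String)
    (h : z ∈ pvReachSet d x) : pvReach d x z := by
  unfold pvReachSet at h
  suffices hh : ∀ i z, z ∈ (pvGrow d)^[i] [x] → pvReach d x z from hh _ z h
  intro i
  induction i with
  | zero => intro z hz; simp at hz; subst hz; exact pvReach.refl _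
  | succ m ih =>
    intro z hz
    rw [Function.iterate_succ_apply'] at hz
    rcases (pvGrow_mem d _ z).mp hz with h1 | ⟨y, hy, hzc⟩
    · exact ih z h1
    · exact pvReach.tail (ih y hy) hzc

theorem pvReachSet_complete (d : PySem.Dict String (List String)) {x z : String}
    (h : pvReach d x z) : z ∈ pvReachSet d x := by
  induction h with
  | refl => exact pv_mem_self d x
  | tail _ hc ih =>
    rw [← pvReachSet_fixed d x]
    exact (pvGrow_mem d _ _).mpr (Or.inr ⟨_, ih, hc⟩)

theorem pvReach_trans (d : PySem.Dict String (List String)) {x y z : String}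
    (h1 : pvReach d x y) (h2 : pvReach d y z) : pvReach d x z := by
  induction h2 with
  | refl => exact h1
  | tail _ hc ih => exact pvReach.tail ih hc

theorem pvReachSet_child_subset (d : PySem.Dict String (List String)) {x c : String}
    (hc : c ∈ pvChildren d x) : pvReachSet d c ⊆ pvReachSet d x := by
  intro z hz
  exact pvReachSet_complete d (pvReach_trans d (pvReach.tail (pvReach.refl x) hc) (pvReachSet_sound d c z hz))

-- the Pre_ condition on the Dict, and its inheritance along edges
def pvGood (d : PySem.Dict String (List String)) (x : String) : Prop :=
  ∀ y ∈ pvReachSet d x, PySem.Dict.contains d y = true ∧ ∀ c ∈ pvChildren d y, y ∉ pvReachSet d c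

theorem pvGood_child (d : PySem.Dict String (List String)) {x c : String}
    (h : pvGood d x) (hc : c ∈ pvChildren d x) : pvGood d c :=
  fun y hy => h y (pvReachSet_child_subset d hc hy)

def pvMu (d : PySem.Dict String (List String)) (x : String) : Nat := (pvReachSet d x).length

theorem pvReachSet_nodup (d : PySem.Dict String (List String)) (x : String) :
    (pvReachSet d x).Nodup := pv_iter_nodup d x (pvFuelR d)

theorem pvMu_child_lt (d : PySem.Dict String (List String)) {x c : String}
    (h : pvGood d x) (hc : c ∈ pvChildren d x) : pvMu d c < pvMu d x := by
  have hsub := pvReachSet_child_subset d hc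
  have hxnot : x ∉ pvReachSet d c := (h x (pv_mem_self d x)).2 c hc
  have hcard : (pvReachSet d c).toFinset ⊂ (pvReachSet d x).toFinset := by
    constructor
    · intro a ha; simp only [List.mem_toFinset] at *; exact hsub ha
    · intro hsup
      exact hxnot (by simpa using hsup (by simpa using pv_mem_self d x))
  have := Finset.card_lt_card hcard
  unfold pvMu
  rw [← List.toFinset_card_of_nodup (pvReachSet_nodup d c), ← List.toFinset_card_of_nodup (pvReachSet_nodup d x)]
  exact this

theorem pvMu_le (d : PySem.Dict String (List String)) (x : String)
    (h : pvGood d x) : pvMu d x ≤ d.items.length := by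
  have hsub : pvReachSet d x ⊆ d.keys := by
    intro y hy
    exact (PySem.Dict.contains_iff_mem_keys d y).mp (h y hy).1
  have := pv_nodup_subset_length (pvReachSet_nodup d x) hsub
  simpa [PySem.Dict.keys] using this

-- A-side: fuel-stability of the recursive port above the measure
theorem pv_goA_stable (d : PySem.Dict String (List String)) :
    ∀ n (x : String), pvGood d x → pvMu d x = n → ∀ f1 f2, n < f1 → n < f2 →
      ∀ diz lev, livelliGo d f1 x diz lev = livelliGo d f2 x diz lev := by
  intro n
  induction n using Nat.strong_induction_on with
  | _ n ih =>
    intro x hg hmu f1 f2 h1 h2 diz lev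
    obtain ⟨a, rfl⟩ : ∃ a, f1 = a + 1 := ⟨f1 - 1, by omega⟩
    obtain ⟨b, rfl⟩ : ∃ b, f2 = b + 1 := ⟨f2 - 1, by omega⟩
    simp only [livelliGo]
    apply PySem.List.foldl_congr_mem'
    intro c hc dz
    have hc' : c ∈ pvChildren d x := hc
    have hgc := pvGood_child d hg hc'
    have hlt := pvMu_child_lt d hg hc'
    exact ih (pvMu d c) (by omega) c hgc rfl a b (by omega) (by omega) dz (lev + 1)

-- the canonical (fuel-independent) value of A's recursion
def pvArun (d : PySem.Dict String (List String)) (x : String) (diz : PySem.Dict String (List String)) (lev : Int) : PySem.Dict String (List String) :=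
  livelliGo d (pvMu d x + 1) x diz lev

def pvUpd (x : String) (lev : Int) (dz : PySem.Dict String (List String)) : PySem.Dict String (List String) :=
  PySem.Dict.modify (if PySem.Dict.contains dz (PySem.Int.toStr lev) then dz else PySem.Dict.insert dz (PySem.Int.toStr lev) []) (PySem.Int.toStr lev) [] (fun l => l ++ [x])

theorem pv_goA_eq_arun (d : PySem.Dict String (List String)) (x : String) (h : pvGood d x)
    (f : Nat) (hf : pvMu d x < f) (diz : PySem.Dict String (List String)) (lev : Int) :
    livelliGo d f x diz lev = pvArun d x diz lev :=
  pv_goA_stable d (pvMu d x) x h rfl f (pvMu d x + 1) hf (Nat.lt_succ_self _) diz lev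

theorem pvArun_step (d : PySem.Dict String (List String)) (x : String) (h : pvGood d x)
    (diz : PySem.Dict String (List String)) (lev : Int) :
    pvArun d x diz lev = (pvChildren d x).foldl (fun dz c => pvArun d c dz (lev + 1)) (pvUpd x lev diz) := by
  unfold pvArun pvUpd
  conv_lhs => rw [livelliGo]
  apply PySem.List.foldl_congr_mem'
  intro c hc dz
  have hc' : c ∈ pvChildren d x := hc
  exact pv_goA_eq_arun d c (pvGood_child d h hc') (pvMu d x) (pvMu_child_lt d h hc') dz (lev + 1)

-- B's update equals A's update
theorem pv_updB_eq (node : String) (lev : Int) (diz : PySem.Dict String (List String)) :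
    PySem.Dict.modify (PySem.Dict.setdefault diz (PySem.Int.toStr lev) []) (PySem.Int.toStr lev) [] (fun l => l ++ [node]) = pvUpd node lev diz := by
  unfold pvUpd
  by_cases h : PySem.Dict.contains diz (PySem.Int.toStr lev) = true
  · rw [PySem.Dict.setdefault_of_contains _ _ h, if_pos h]
  · rw [PySem.Dict.setdefault_of_not_contains _ _ (by simpa using h), if_neg h]

-- visit counts
def pvCntGo (d : PySem.Dict String (List String)) : Nat → String → Nat
  | 0, _ => 1
  | f + 1, x => 1 + ((pvChildren d x).map (pvCntGo d f)).sum

def pvCnt (d : PySem.Dict String (List String)) (x : String) : Nat := pvCntGo d (pvMu d x + 1) x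

theorem pvCntGo_pos (d : PySem.Dict String (List String)) (f : Nat) (x : String) :
    1 ≤ pvCntGo d f x := by
  cases f <;> simp [pvCntGo]

theorem pv_cnt_stable (d : PySem.Dict String (List String)) :
    ∀ n (x : String), pvGood d x → pvMu d x = n → ∀ f1 f2, n < f1 → n < f2 →
      pvCntGo d f1 x = pvCntGo d f2 x := by
  intro n
  induction n using Nat.strong_induction_on with
  | _ n ih =>
    intro x hg hmu f1 f2 h1 h2
    obtain ⟨a, rfl⟩ : ∃ a, f1 = a + 1 := ⟨f1 - 1, by omega⟩
    obtain ⟨b, rfl⟩ : ∃ b, f2 = b + 1 := ⟨f2 - 1, by omega⟩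
    simp only [pvCntGo]
    congr 1
    apply congrArg
    apply List.map_congr_left
    intro c hc
    have hgc := pvGood_child d hg hc
    have hlt := pvMu_child_lt d hg hc
    exact ih (pvMu d c) (by omega) c hgc rfl a b (by omega) (by omega)

theorem pvCnt_step (d : PySem.Dict String (List String)) (x : String) (h : pvGood d x) :
    pvCnt d x = 1 + ((pvChildren d x).map (pvCnt d)).sum := by
  unfold pvCnt
  conv_lhs => rw [pvCntGo]
  congr 1
  apply congrArg
  apply List.map_congr_left
  intro c hc
  exact pv_cnt_stable d (pvMu d c) c (pvGood_child d h hc) rfl (pvMu d x) (pvMu d c + 1)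
    (pvMu_child_lt d h hc) (Nat.lt_succ_self _)

theorem pv_goB_nil (d : PySem.Dict String (List String)) (f : Nat) (diz : PySem.Dict String (List String)) :
    livelliAltGo d f [] diz = diz := by
  cases f <;> rfl

-- the stack machine runs a block of same-level entries like A's fold over them
theorem pv_goB_run (d : PySem.Dict String (List String)) :
    ∀ n (cs : List String) (lev : Int), (∀ c ∈ cs, pvGood d c) → ((cs.map (pvCnt d)).sum = n) →
      ∀ f, n ≤ f → ∀ stack diz,
      livelliAltGo d f ((cs.map (fun c => (c, lev))) ++ stack) diz
        = livelliAltGo d (f - n) stack (cs.foldl (fun dz c => pvArun d c dz lev) diz) := by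
  intro n
  induction n using Nat.strong_induction_on with
  | _ n ih =>
    intro cs lev hgood hsum f hf stack diz
    cases cs with
    | nil => simp at hsum; subst hsum; simp
    | cons c cs' =>
      have hgc : pvGood d c := hgood c (by simp)
      have hpos : 1 ≤ pvCnt d c := pvCntGo_pos d _ c
      have hstep := pvCnt_step d c hgc
      have hsum' : pvCnt d c + (cs'.map (pvCnt d)).sum = n := by
        simpa using hsum
      obtain ⟨g, rfl⟩ : ∃ g, f = g + 1 := ⟨f - 1, by omega⟩
      simp only [List.map_cons, List.cons_append, livelliAltGo]
      rw [pv_updB_eq]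
      have h1 := ih ((pvChildren d c).map (pvCnt d)).sum (by omega) (pvChildren d c) (lev + 1)
        (fun e he => pvGood_child d hgc he) rfl g (by omega)
        ((cs'.map (fun e => (e, lev))) ++ stack) (pvUpd c lev diz)
      rw [show (((PySem.Dict.get? d c).getD []).map (fun e => (e, lev + 1))) = ((pvChildren d c).map (fun e => (e, lev + 1))) from rfl, h1]
      rw [← pvArun_step d c hgc diz lev]
      have h2 := ih ((cs'.map (pvCnt d)).sum) (by omega) cs' lev
        (fun e he => hgood e (by simp [he])) rfl (g - ((pvChildren d c).map (pvCnt d)).sum)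
        (by omega) stack (pvArun d c diz lev)
      rw [h2]
      have harith : g - ((pvChildren d c).map (pvCnt d)).sum - (cs'.map (pvCnt d)).sum = g + 1 - n := by omega
      rw [harith]
      simp [List.foldl_cons]

-- fuel bound for the stack machine
theorem pv_childlen_le (d : PySem.Dict String (List String)) (y : String) :
    (pvChildren d y).length ≤ (d.items.map (fun p => p.2.length)).sum := by
  unfold pvChildren
  cases hg : PySem.Dict.get? d y with
  | none => simp
  | some l =>
    simp only [Option.getD_some]
    have hm : (y, l) ∈ d.items := PySem.Dict.mem_items_of_get?_eq_some _ hg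
    have : l.length ∈ d.items.map (fun p => p.2.length) := List.mem_map.mpr ⟨(y, l), hm, rfl⟩
    exact List.single_le_sum (fun a _ => Nat.zero_le a) _ this

theorem pvCntGo_le (d : PySem.Dict String (List String)) :
    ∀ (f : Nat) (x : String), pvCntGo d f x ≤ ((d.items.map (fun p => p.2.length)).sum + 1) ^ f := by
  intro f
  induction f with
  | zero => intro x; simp [pvCntGo]
  | succ m ih =>
    intro x
    set S := (d.items.map (fun p => p.2.length)).sum with hS
    have hsum : ((pvChildren d x).map (pvCntGo d m)).sum ≤ (pvChildren d x).length * (S + 1) ^ m := by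
      have := List.sum_le_card_nsmul ((pvChildren d x).map (pvCntGo d m)) ((S + 1) ^ m)
        (by intro v hv; rcases List.mem_map.mp hv with ⟨c, _, rfl⟩; exact ih c)
      simpa [smul_eq_mul] using this
    have hlen := pv_childlen_le d x
    have hone : 1 ≤ (S + 1) ^ m := Nat.one_le_pow _ _ (by omega)
    calc pvCntGo d (m + 1) x = 1 + ((pvChildren d x).map (pvCntGo d m)).sum := rfl
      _ ≤ 1 + S * (S + 1) ^ m := by
          have : (pvChildren d x).length * (S + 1) ^ m ≤ S * (S + 1) ^ m :=
            Nat.mul_le_mul_right _ hlen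
          omega
      _ ≤ (S + 1) ^ m + S * (S + 1) ^ m := by omega
      _ = (S + 1) ^ (m + 1) := by ring

theorem pvCnt_le_bigFuel (dl : List (String × List String)) (x : String)
    (h : pvGood (PySem.Dict.mk dl) x) : pvCnt (PySem.Dict.mk dl) x ≤ pvBigFuel dl := by
  have hS : dl.foldl (fun a p => a + p.2.length) 0 = (dl.map (fun p => p.2.length)).sum := by
    simpa using pv_foldl_sum dl 0
  have hmu : pvMu (PySem.Dict.mk dl) x ≤ dl.length := by
    simpa using pvMu_le (PySem.Dict.mk dl) x h
  set S := (dl.map (fun p => p.2.length)).sum with hSdef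
  have h1 : pvCnt (PySem.Dict.mk dl) x ≤ (S + 1) ^ (pvMu (PySem.Dict.mk dl) x + 1) := by
    have := pvCntGo_le (PySem.Dict.mk dl) (pvMu (PySem.Dict.mk dl) x + 1) x
    simpa using this
  have h2 : (S + 1) ^ (pvMu (PySem.Dict.mk dl) x + 1) ≤ (S + 2) ^ (dl.length + 2) := by
    calc (S + 1) ^ (pvMu (PySem.Dict.mk dl) x + 1) ≤ (S + 2) ^ (pvMu (PySem.Dict.mk dl) x + 1) :=
        Nat.pow_le_pow_left (by omega) _
      _ ≤ (S + 2) ^ (dl.length + 2) := Nat.pow_le_pow_right (by omega) (by omega)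
  unfold pvBigFuel
  rw [hS]
  exact le_trans h1 h2

-- ===== VERDICT (by name: the statement is the Claim_ definition above) =====
theorem livelli_spec : Claim_equal_livelli := by
  intro d x diz livello _hDom hPre
  unfold Spec_livelli livelli livelli_alt
  have hGood : pvGood (PySem.Dict.mk d) x := hPre
  have h1 : livelliGo (PySem.Dict.mk d) (d.length + 1) x (PySem.Dict.mk diz) livello
      = pvArun (PySem.Dict.mk d) x (PySem.Dict.mk diz) livello := by
    apply pv_goA_eq_arun _ _ hGood
    have := pvMu_le (PySem.Dict.mk d) x hGood
    simpa using Nat.lt_succ_of_le (by simpa using this)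
  have h2 : livelliAltGo (PySem.Dict.mk d) (pvBigFuel d) [(x, livello)] (PySem.Dict.mk diz)
      = pvArun (PySem.Dict.mk d) x (PySem.Dict.mk diz) livello := by
    have hrun := pv_goB_run (PySem.Dict.mk d) (pvCnt (PySem.Dict.mk d) x) [x] livello
      (by intro c hc; simp at hc; subst hc; exact hGood) (by simp)
      (pvBigFuel d) (pvCnt_le_bigFuel d x hGood) [] (PySem.Dict.mk diz)
    simpa [pv_goB_nil] using hrun
  rw [h1, h2]
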